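-- pv_equiv track=rewrite | github.com/Luvishable/LEETCODE-SOLUTIONS | x_times.py | xTimes
-- ===== SOURCE A (Python) =====
-- import math
--
-- def xTimes(array):
--     my_dict = {}
--     for i in array:
--         if i not in my_dict:
--             my_dict[i] = 1
--         else:
--             my_dict[i] += 1
--
--     counter = 0
--     for key, value in my_dict.items():
--         if key == value:
--             continue
--
--         if math.ceil(key/2) <= value and key > value:
--             counter += (key - value)
--
--         if value > key:
--             counter += (value - key)
--
--         if value < math.ceil(key/2):
--             counter += value
--
--     return counter
-- ===== SOURCE B (Python) =====
-- import math
--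
-- def xTimes(array):
--     counter = 0
--     s = sorted(array)
--     n = len(s)
--     i = 0
--     while i < n:
--         key = s[i]
--         j = i
--         while j < n and s[j] == key:
--             j += 1
--         value = j - i
--         i = j
--         if key == value:
--             continue
--         if math.ceil(key/2) <= value and key > value:
--             counter += (key - value)
--         if value > key:
--             counter += (value - key)
--         if value < math.ceil(key/2):
--             counter += value
--     return counter
-- ===== Notes on version B (the rewrite author's own statement) =====
-- stated objective: alternative
-- what changed: Replaced the hash-dict frequency counting with a sort-then-group pass: scan sorted(array) once, computing each run's length as the value's frequency, and apply the identical four-branch adjustment per run; the sum is order-independent so grouping order does not matter.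
import Mathlib
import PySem

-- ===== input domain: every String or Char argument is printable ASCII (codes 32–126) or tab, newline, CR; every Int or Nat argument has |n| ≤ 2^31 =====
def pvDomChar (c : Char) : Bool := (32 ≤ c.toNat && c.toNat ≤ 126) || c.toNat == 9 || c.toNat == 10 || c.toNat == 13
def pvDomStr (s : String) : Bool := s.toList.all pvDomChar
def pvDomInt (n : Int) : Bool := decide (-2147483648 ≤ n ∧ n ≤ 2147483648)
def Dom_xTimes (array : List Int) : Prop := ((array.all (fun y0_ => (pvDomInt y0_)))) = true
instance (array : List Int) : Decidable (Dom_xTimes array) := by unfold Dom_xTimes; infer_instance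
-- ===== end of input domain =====

-- B replaces A's hash-dict frequency count with a sort-then-group run-length scan (alternative decomposition, same per-key arithmetic).

-- math.ceil(k/2) for an int k; exact on |k| ≤ 2^31 where k/2 is an exact float
def pvCeilHalf (k : Int) : Int := -(PySem.Int.floordiv (-k) 2)

-- the shared per-(key,value) loop body (identical in both Pythons): the continue plus the three conditional additions
def pvStep (counter : Int) (kv : Int × Int) : Int :=
  if kv.1 = kv.2 then counter
  else
    let c1 := if pvCeilHalf kv.1 ≤ kv.2 ∧ kv.1 > kv.2 then counter + (kv.1 - kv.2) else counter
    let c2 := if kv.2 > kv.1 then c1 + (kv.2 - kv.1) else c1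
    if kv.2 < pvCeilHalf kv.1 then c2 + kv.2 else c2

-- ===== PORT A =====
def xTimes (array : List Int) : Int :=
  let myDict : PySem.Dict Int Int :=
    array.foldl (fun d i =>
      if d.contains i = false then d.insert i 1 else d.insert i (d.getD i 0 + 1))
      PySem.Dict.empty
  myDict.items.foldl pvStep 0

-- ===== PORT B =====
-- the inner while loop of Source B: split off the run of the head element, record (key, run length)
def runGroups : List Int → List (Int × Int)
  | [] => []
  | x :: xs =>
      (x, ((xs.takeWhile (· == x)).length + 1 : Int)) :: runGroups (xs.dropWhile (· == x))
  termination_by l => l.length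
  decreasing_by
    have := List.length_dropWhile_le (p := (· == x)) (l := xs)
    simp; omega

def xTimes_alt (array : List Int) : Int :=
  (runGroups (PySem.List.sorted array (fun x => x) false)).foldl pvStep 0

-- ===== PRECONDITION & SPEC =====
def Spec_xTimes (array : List Int) (out : Int) : Prop := out = xTimes_alt array
instance (array : List Int) (out : Int) : Decidable (Spec_xTimes array out) := by unfold Spec_xTimes; infer_instance

-- ===== CLAIM (what is proved, stated in full; the proofs are below) =====
def Claim_equal_xTimes : Prop := ∀ (array : List Int), Dom_xTimes array → Spec_xTimes array (xTimes array)

-- ===== LEMMAS AND PROOFS =====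

theorem pvStep_add (c : Int) (kv : Int × Int) : pvStep c kv = c + pvStep 0 kv := by
  unfold pvStep; split_ifs <;> simp <;> ring

theorem foldl_pvStep (l : List (Int × Int)) (c : Int) :
    l.foldl pvStep c = c + (l.map (pvStep 0)).sum := by
  induction l generalizing c with
  | nil => simp
  | cons kv t ih => simp [List.foldl_cons, ih, pvStep_add c kv]; ring

theorem dictA_eq_counter (array : List Int) :
    array.foldl (fun d i =>
        if d.contains i = false then d.insert i 1 else d.insert i (d.getD i 0 + 1))
      (PySem.Dict.empty : PySem.Dict Int Int) = PySem.Dict.counter array := by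
  have hf : (fun (d : PySem.Dict Int Int) i =>
      if d.contains i = false then d.insert i 1 else d.insert i (d.getD i 0 + 1))
      = fun d x => d.insert x (d.getD x 0 + 1) := by
    funext d i
    split_ifs with h
    · rw [PySem.Dict.getD_of_not_contains d 0 h]; norm_num
    · rfl
  rw [hf, PySem.Dict.foldl_insert_getD_add_one_eq_counter]

-- characterisation of B's grouped scan on a sorted list, as a Finset sum
theorem runGroups_sum (s : List Int) (hs : s.Pairwise (· ≤ ·)) :
    ((runGroups s).map (pvStep 0)).sum
      = ∑ k ∈ s.toFinset, pvStep 0 (k, (s.count k : Int)) := by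
  induction s using runGroups.induct with
  | case1 => simp [runGroups]
  | case2 x xs ih =>
    have hsplit := List.takeWhile_append_dropWhile (p := (· == x)) (l := xs)
    set tk := xs.takeWhile (· == x) with htk
    set dp := xs.dropWhile (· == x) with hdp
    have hxle : ∀ y ∈ xs, x ≤ y := fun y hy => (List.pairwise_cons.mp hs).1 y hy
    have hdpsub : dp.Sublist xs := List.dropWhile_sublist _
    have hdp_pw : dp.Pairwise (· ≤ ·) := ((List.pairwise_cons.mp hs).2).sublist hdpsub
    -- x does not occur in dp
    have hxnotin : x ∉ dp := by
      intro hmem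
      cases hdpe : dp with
      | nil => rw [hdpe] at hmem; simp at hmem
      | cons h t =>
        have hh : ¬ (h == x) = true := by
          have := List.head?_dropWhile_not (p := (· == x)) (l := xs)
          rw [← hdp, hdpe] at this; simpa using this
        have hhx : h ≠ x := by simpa using hh
        have hhle : x ≤ h := hxle h (hdpsub.mem (by simp [hdpe]))
        have hlt : x < h := lt_of_le_of_ne hhle (Ne.symm hhx)
        rw [hdpe] at hmem
        rcases List.mem_cons.mp hmem with h1 | h2
        · exact hhx h1.symm
        · have : h ≤ x := by
            rcases List.pairwise_cons.mp (hdpe ▸ hdp_pw) with ⟨hall, _⟩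
            exact hall x h2
          omega
    -- every element of tk equals x
    have htkx : ∀ y ∈ tk, y = x := by
      intro y hy
      have := List.mem_takeWhile_imp hy
      simpa using this
    -- count of x in x :: xs
    have hcx : (x :: xs).count x = tk.length + 1 := by
      have h1 : xs.count x = tk.count x + dp.count x := by
        conv_lhs => rw [← hsplit]
        simp [List.count_append]
      have h2 : tk.count x = tk.length := by
        rw [List.count_eq_length]
        intro b hb; exact (htkx b hb).symm
      have h3 : dp.count x = 0 := List.count_eq_zero.mpr hxnotin
      simp [List.count_cons_self, h1, h2, h3]
    -- counts of other elements
    have hck : ∀ k ∈ dp, (x :: xs).count k = dp.count k := by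
      intro k hk
      have hkx : k ≠ x := fun h => hxnotin (h ▸ hk)
      have h1 : xs.count k = tk.count k + dp.count k := by
        conv_lhs => rw [← hsplit]
        simp [List.count_append]
      have h2 : tk.count k = 0 := by
        rw [List.count_eq_zero]
        intro hmem; exact hkx (htkx k hmem)
      rw [List.count_cons_of_ne (Ne.symm hkx), h1, h2]; ring
    -- toFinset decomposition
    have htf : (x :: xs).toFinset = insert x dp.toFinset := by
      ext a
      simp only [List.toFinset_cons, Finset.mem_insert, List.mem_toFinset]
      constructor
      · rintro (rfl | ha)
        · exact Or.inl rfl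
        · rw [← hsplit] at ha
          rcases List.mem_append.mp ha with h1 | h2
          · exact Or.inl (htkx a h1)
          · exact Or.inr h2
      · rintro (rfl | ha)
        · exact Or.inl rfl
        · exact Or.inr (hdpsub.mem ha)
    have hxnf : x ∉ dp.toFinset := by simpa using hxnotin
    rw [runGroups]
    simp only [List.map_cons, List.sum_cons, htf, Finset.sum_insert hxnf]
    rw [ih hdp_pw]
    congr 1
    · congr 1
      rw [hcx]; push_cast; ring
    · apply Finset.sum_congr rfl
      intro k hk
      rw [hck k (List.mem_toFinset.mp hk)]

theorem nodup_sum_toFinset (l : List Int) (hl : l.Nodup) (f : Int → Int) :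
    (l.map f).sum = ∑ k ∈ l.toFinset, f k := by
  induction l with
  | nil => simp
  | cons x t ih =>
    have hx : x ∉ t := (List.nodup_cons.mp hl).1
    have hxf : x ∉ t.toFinset := by simpa using hx
    simp [Finset.sum_insert hxf, ih (List.nodup_cons.mp hl).2]

-- ===== VERDICT (by name: the statement is the Claim_ definition above) =====
theorem xTimes_spec : Claim_equal_xTimes := by
  intro array _
  unfold Spec_xTimes xTimes xTimes_alt
  rw [dictA_eq_counter, foldl_pvStep, foldl_pvStep]
  simp only [zero_add]
  set s := PySem.List.sorted array (fun x => x) false with hsdef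
  have hperm : s.Perm array := PySem.List.sorted_perm array (fun x => x) false
  have hpw : s.Pairwise (· ≤ ·) := by
    have := PySem.List.sorted_pairwise array (fun x => x)
    simpa using this
  rw [runGroups_sum s hpw]
  rw [PySem.Dict.items_counter, List.map_map]
  have hded : (PySem.Set.ofList array).Nodup := PySem.Set.nodup_ofList array
  rw [nodup_sum_toFinset _ hded]
  have htf1 : (PySem.Set.ofList array).toFinset = array.toFinset := by
    ext a; simp [PySem.Set.mem_ofList]
  have htf2 : s.toFinset = array.toFinset := by ext a; simp [hperm.mem_iff]
  rw [htf1, ← htf2]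
  apply Finset.sum_congr rfl
  intro k _
  simp [hperm.count_eq]
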